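-- pv_equiv track=rewrite | github.com/mlabudde/wcc | src/main/python/main.py | splitFixedLine
-- ===== SOURCE A (Python) =====
-- def splitFixedLine(line, aNumRounds):
--     elements = list()
--     if (line):
--         elements.append(line[0:9].strip())
--         elements.append(line[9:13].strip())
--         elements.append(line[14:31].strip())
--         elements.append(line[32:34].strip())
--         elements.append(line[35:43].strip())
--         elements.append(line[43:51].strip())
--
--         for i in range(aNumRounds):
--             start = 51 + (6 * i)
--             end = start + 6
--             elements.append(line[start:end].strip())
--
--     return elements
-- ===== SOURCE B (Python) =====
-- def splitFixedLine(line, aNumRounds):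
--     elements = []
--     if line:
--         # schema of (gap-to-skip, field-width) pairs; the line is consumed left to right
--         schema = [(0, 9), (0, 4), (1, 17), (1, 2), (1, 8), (0, 8)] + [(0, 6)] * aNumRounds
--         rest = line
--         for skip, width in schema:
--             elements.append(rest[skip:skip + width].strip())
--             rest = rest[skip + width:]
--     return elements
-- ===== Notes on version B (the rewrite author's own statement) =====
-- stated objective: alternative
-- what changed: B drives a single loop by a (gap, width) schema and consumes the line left to right over a shrinking remainder string, instead of A's six hard-coded absolute-offset slices plus an index loop computing absolute starts.
import Mathlib
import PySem

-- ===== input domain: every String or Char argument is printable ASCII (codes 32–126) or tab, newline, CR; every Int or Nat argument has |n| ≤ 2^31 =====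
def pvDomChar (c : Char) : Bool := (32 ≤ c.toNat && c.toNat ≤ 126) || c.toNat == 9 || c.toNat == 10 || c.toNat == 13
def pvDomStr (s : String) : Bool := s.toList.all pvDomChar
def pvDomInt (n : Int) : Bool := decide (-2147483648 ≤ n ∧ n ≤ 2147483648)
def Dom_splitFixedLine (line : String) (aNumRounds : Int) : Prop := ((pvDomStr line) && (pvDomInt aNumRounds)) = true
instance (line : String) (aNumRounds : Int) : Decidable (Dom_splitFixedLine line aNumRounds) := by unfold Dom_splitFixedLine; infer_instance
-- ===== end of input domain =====

-- B replaces absolute-offset slicing (six appends plus an index loop) with a (gap, width) schema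
-- consumed left to right over a shrinking remainder of the line; same values on all inputs.
-- ===== PORT A =====
def splitFixedLine (line : String) (aNumRounds : Int) : List String :=
  if line ≠ "" then
    let elements : List String :=
      [PySem.Str.strip (PySem.Str.slice line (some 0) (some 9)),
       PySem.Str.strip (PySem.Str.slice line (some 9) (some 13)),
       PySem.Str.strip (PySem.Str.slice line (some 14) (some 31)),
       PySem.Str.strip (PySem.Str.slice line (some 32) (some 34)),
       PySem.Str.strip (PySem.Str.slice line (some 35) (some 43)),
       PySem.Str.strip (PySem.Str.slice line (some 43) (some 51))]
    (PySem.List.pyRange 0 aNumRounds 1).foldl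
      (fun acc i =>
        let start := 51 + 6 * i
        let stop := start + 6
        acc ++ [PySem.Str.strip (PySem.Str.slice line (some start) (some stop))])
      elements
  else []

-- ===== PORT B =====
def splitFixedLine_alt (line : String) (aNumRounds : Int) : List String :=
  if line ≠ "" then
    let schema : List (Int × Int) :=
      [(0, 9), (0, 4), (1, 17), (1, 2), (1, 8), (0, 8)] ++
        List.replicate aNumRounds.toNat ((0 : Int), (6 : Int))
    (schema.foldl
      (fun (st : List String × String) sw =>
        (st.1 ++ [PySem.Str.strip (PySem.Str.slice st.2 (some sw.1) (some (sw.1 + sw.2)))],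
         PySem.Str.slice st.2 (some (sw.1 + sw.2)) none))
      ([], line)).1
  else []

-- ===== PRECONDITION & SPEC =====
def Spec_splitFixedLine (line : String) (aNumRounds : Int) (out : List String) : Prop := out = splitFixedLine_alt line aNumRounds
instance (line : String) (aNumRounds : Int) (out : List String) : Decidable (Spec_splitFixedLine line aNumRounds out) := by unfold Spec_splitFixedLine; infer_instance

-- ===== CLAIM (what is proved, stated in full; the proofs are below) =====
def Claim_equal_splitFixedLine : Prop := ∀ (line : String) (aNumRounds : Int), Dom_splitFixedLine line aNumRounds → Spec_splitFixedLine line aNumRounds (splitFixedLine line aNumRounds)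

-- ===== LEMMAS AND PROOFS =====

/-- Absolute (start, stop) bounds generated by a (gap, width) schema starting at `off`. -/
def absBounds : Nat → List (Nat × Nat) → List (Nat × Nat)
  | _, [] => []
  | off, (g, w) :: r => (off + g, off + g + w) :: absBounds (off + g + w) r

/-- One canonical field of the line at absolute nat bounds. -/
def fieldAt (xs : List Char) (q : Nat × Nat) : String :=
  String.ofList (PySem.Chars.strip (PySem.List.slice xs (some (q.1 : Int)) (some (q.2 : Int))))

lemma foldl_append_map {α β : Type} (l : List α) (init : List β) (f : α → β) :
    l.foldl (fun acc i => acc ++ [f i]) init = init ++ l.map f := by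
  induction l generalizing init with
  | nil => simp
  | cons x xs ih => simp [List.foldl, ih]

/-- B's consuming fold over a nat schema produces the fields at the absolute bounds. -/
lemma consume (spec : List (Nat × Nat)) (xs : List Char) (off : Nat) (acc : List String) :
    ((spec.map (fun p => ((p.1 : Int), (p.2 : Int)))).foldl
      (fun (st : List String × String) sw =>
        (st.1 ++ [PySem.Str.strip (PySem.Str.slice st.2 (some sw.1) (some (sw.1 + sw.2)))],
         PySem.Str.slice st.2 (some (sw.1 + sw.2)) none))
      (acc, String.ofList (xs.drop off))).1
    = acc ++ (absBounds off spec).map (fieldAt xs) := by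
  induction spec generalizing off acc with
  | nil => simp [absBounds]
  | cons p r ih =>
    obtain ⟨g, w⟩ := p
    have hcast : ((g : Int) + (w : Int)) = ((g + w : Nat) : Int) := by push_cast; ring
    have hfield :
        PySem.Str.strip (PySem.Str.slice (String.ofList (xs.drop off)) (some (g : Int)) (some ((g : Int) + (w : Int))))
          = fieldAt xs (off + g, off + g + w) := by
      simp only [hcast, PySem.Str.strip, PySem.Str.slice, fieldAt, String.toList_ofList,
        PySem.Chars.slice_eq_listSlice, PySem.List.slice_natCast, List.drop_drop]
      have e1 : g + w - g = w := by omega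
      have e2 : off + g + w - (off + g) = w := by omega
      rw [e1, e2]
    have hrest :
        PySem.Str.slice (String.ofList (xs.drop off)) (some ((g : Int) + (w : Int))) none
          = String.ofList (xs.drop (off + g + w)) := by
      simp only [hcast, PySem.Str.slice, String.toList_ofList, PySem.Chars.slice_eq_listSlice,
        PySem.List.slice_from_natCast, List.drop_drop]
      have e3 : off + (g + w) = off + g + w := by omega
      rw [e3]
    simp only [List.map_cons, List.foldl_cons, hfield, hrest, absBounds, ih]
    simp

/-- Bounds generated by `n` consecutive 6-wide fields from `off`. -/
lemma absBounds_replicate (n : Nat) (off : Nat) :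
    absBounds off (List.replicate n (0, 6))
      = (List.range n).map (fun i => (off + 6 * i, off + 6 * i + 6)) := by
  induction n generalizing off with
  | zero => simp [absBounds]
  | succ m ih =>
    rw [List.replicate_succ, List.range_succ_eq_map]
    simp only [absBounds, ih, List.map_cons, List.map_map]
    congr 1
    apply List.map_congr_left
    intro i _
    simp only [Function.comp_apply, Prod.mk.injEq]
    omega

-- ===== VERDICT (by name: the statement is the Claim_ definition above) =====
theorem splitFixedLine_spec : Claim_equal_splitFixedLine := by
  intro line aNumRounds _
  unfold Spec_splitFixedLine splitFixedLine splitFixedLine_alt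
  by_cases h : line = ""
  · simp [h]
  · simp only [h, ne_eq, not_false_eq_true, if_true]
    have hschema :
        ([((0 : Int), (9 : Int)), (0, 4), (1, 17), (1, 2), (1, 8), (0, 8)] ++
            List.replicate aNumRounds.toNat ((0 : Int), (6 : Int)))
          = (([(0, 9), (0, 4), (1, 17), (1, 2), (1, 8), (0, 8)] ++
              List.replicate aNumRounds.toNat ((0 : Nat), (6 : Nat))).map
              (fun p : Nat × Nat => ((p.1 : Int), (p.2 : Int)))) := by
      simp
    rw [hschema]
    have hline : line = String.ofList (line.toList.drop 0) := by simp
    conv_rhs => rw [hline]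
    rw [consume]
    rw [foldl_append_map, PySem.List.pyRange_one]
    simp only [List.cons_append, List.nil_append, absBounds, absBounds_replicate,
      List.map_cons, List.map_map]
    simp only [Int.sub_zero]
    simp [fieldAt, PySem.Str.strip, PySem.Str.slice, PySem.Chars.slice_eq_listSlice,
      zero_add, Nat.cast_add, Nat.cast_mul, Nat.cast_ofNat]
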